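-- pv_equiv track=rewrite | github.com/pali-sutta-readings/pali-exercises | src/anki_generator/parser.py | _split_table_row
-- ===== SOURCE A (Python) =====
-- def _split_table_row(line: str) -> list[str]:
--     """Split a table row into cells.
--
--     Handles lines like: [Cell 1], [Cell 2],
--     Also handles nested brackets like: [#strong[word]], [definition],
--     """
--     cells = []
--     # Use a simple bracket-counting approach to handle nesting
--     i = 0
--     while i < len(line):
--         if line[i] == '[':
--             # Found start of cell
--             depth = 1
--             start = i + 1
--             i += 1
--             while i < len(line) and depth > 0:
--                 if line[i] == '[':
--                     depth += 1
--                 elif line[i] == ']':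
--                     depth -= 1
--                 i += 1
--             if depth == 0:
--                 cells.append(line[start:i-1])
--         else:
--             i += 1
--     return cells
-- ===== SOURCE B (Python) =====
-- def _split_table_row(line: str) -> list[str]:
--     cells = []
--     cur = []
--     depth = 0
--     for ch in line:
--         if ch == '[':
--             if depth == 0:
--                 cur = []
--             else:
--                 cur.append(ch)
--             depth += 1
--         elif ch == ']':
--             if depth == 1:
--                 cells.append(''.join(cur))
--                 depth = 0
--             elif depth > 1:
--                 cur.append(ch)
--                 depth -= 1
--             # stray ']' at depth 0 is ignored
--         elif depth > 0:
--             cur.append(ch)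
--     return cells
-- ===== Notes on version B (the rewrite author's own statement) =====
-- stated objective: faster
-- what changed: Replaced the outer-seek/inner-rescan nested while loops with a single flat for-loop state machine (depth counter + current-cell accumulator), eliminating per-character indexing and the inner loop.
import Mathlib
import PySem

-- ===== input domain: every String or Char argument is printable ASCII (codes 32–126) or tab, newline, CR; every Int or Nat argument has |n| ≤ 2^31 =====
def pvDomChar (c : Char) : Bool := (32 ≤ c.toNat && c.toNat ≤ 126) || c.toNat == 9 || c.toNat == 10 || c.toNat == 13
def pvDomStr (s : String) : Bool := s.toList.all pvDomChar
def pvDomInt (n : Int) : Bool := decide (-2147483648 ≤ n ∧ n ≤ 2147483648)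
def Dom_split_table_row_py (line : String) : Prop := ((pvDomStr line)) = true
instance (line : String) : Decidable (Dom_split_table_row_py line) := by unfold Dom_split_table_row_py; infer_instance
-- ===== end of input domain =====

-- B replaces A's outer-seek/inner-rescan nested loops by a single flat state-machine pass
-- (depth + current-cell accumulator); same return value, alternative decomposition.

-- ===== PORT A =====
-- A's inner while loop: consumes chars at depth ≥ 1, accumulating the cell's characters
-- (= A's slice line[start:i-1]); each step updates depth from the current char and closes
-- (returning cell and remaining chars) when depth hits 0; none = string ran out at depth > 0
-- (A then appends nothing and its outer loop ends).
def aInner : List Char → Nat → List Char → Option (List Char × List Char)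
  | [], _, _ => none
  | c :: rest, depth, acc =>
    if c = '[' then
      (if depth + 1 = 0 then some (acc, rest) else aInner rest (depth + 1) (acc ++ [c]))
    else if c = ']' then
      (if depth - 1 = 0 then some (acc, rest) else aInner rest (depth - 1) (acc ++ [c]))
    else
      (if depth = 0 then some (acc, rest) else aInner rest depth (acc ++ [c]))

theorem aInner_length : ∀ (l : List Char) (d : Nat) (acc cell rest : List Char),
    aInner l d acc = some (cell, rest) → rest.length < l.length := by
  intro l
  induction l with
  | nil => intro d acc cell rest h; simp [aInner] at h
  | cons c t ih =>
    intro d acc cell rest h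
    simp only [aInner] at h
    split_ifs at h
    all_goals first
      | (cases h; simp)
      | (simpa using Nat.lt_succ_of_lt (ih _ _ _ _ h))

-- A's outer while loop: seek the next '[' and run the inner loop from depth 1.
def aOuter : List Char → List (List Char)
  | [] => []
  | c :: rest =>
    if c = '[' then
      match h : aInner rest 1 [] with
      | some (cell, rest') => cell :: aOuter rest'
      | none => []
    else aOuter rest
termination_by l => l.length
decreasing_by
  · exact Nat.lt_succ_of_lt (aInner_length _ _ _ _ _ h)
  · simp

def split_table_row_py (line : String) : List String :=
  (aOuter line.toList).map String.mk

-- ===== PORT B =====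
-- one step of B's flat for-loop: state = (depth, current cell chars, finished cells)
def bStep (st : Nat × List Char × List (List Char)) (c : Char) :
    Nat × List Char × List (List Char) :=
  let (d, cur, cells) := st
  if c = '[' then
    (d + 1, if d = 0 then [] else cur ++ [c], cells)
  else if c = ']' then
    if d = 1 then (0, cur, cells ++ [cur])
    else if d > 1 then (d - 1, cur ++ [c], cells)
    else st
  else if d > 0 then (d, cur ++ [c], cells) else st

def split_table_row_py_alt (line : String) : List String :=
  ((line.toList.foldl bStep (0, [], [])).2.2).map String.mk

-- ===== PRECONDITION & SPEC =====
def Spec_split_table_row_py (line : String) (out : List String) : Prop := out = split_table_row_py_alt line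
instance (line : String) (out : List String) : Decidable (Spec_split_table_row_py line out) := by unfold Spec_split_table_row_py; infer_instance

-- ===== CLAIM (what is proved, stated in full; the proofs are below) =====
def Claim_equal_split_table_row_py : Prop := ∀ (line : String), Dom_split_table_row_py line → Spec_split_table_row_py line (split_table_row_py line)

-- ===== LEMMAS AND PROOFS =====

-- While B is inside a cell (depth ≥ 1), its fold tracks A's inner loop exactly.
theorem fold_inner : ∀ (l : List Char) (d : Nat) (cur : List Char) (cells : List (List Char)),
    1 ≤ d →
    (l.foldl bStep (d, cur, cells)).2.2 =
      (match aInner l d cur with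
       | some (cell, rest) => (rest.foldl bStep (0, cell, cells ++ [cell])).2.2
       | none => cells) := by
  intro l
  induction l with
  | nil => intro d cur cells hd; simp [aInner]
  | cons c t ih =>
    intro d cur cells hd
    by_cases hb : c = '['
    · subst hb
      simp only [aInner, List.foldl_cons, bStep]
      rw [if_neg (by omega : ¬ (d = 0)), if_neg (by omega : ¬ (d + 1 = 0))]
      exact ih (d + 1) (cur ++ ['[']) cells (by omega)
    · by_cases hc : c = ']'
      · subst hc
        by_cases h1 : d = 1
        · subst h1
          simp [aInner, bStep, hb]
        · have hgt : d > 1 := by omega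
          simp only [aInner, List.foldl_cons, bStep, if_neg hb]
          rw [if_neg h1, if_pos hgt, if_neg (by omega : ¬ (d - 1 = 0))]
          exact ih (d - 1) (cur ++ [']']) cells (by omega)
      · simp only [aInner, List.foldl_cons, bStep, if_neg hb, if_neg hc]
        rw [if_pos (by omega : d > 0), if_neg (by omega : ¬ (d = 0))]
        exact ih d (cur ++ [c]) cells hd

-- At depth 0, B's fold accumulates exactly the cells A's outer loop produces.
theorem fold_outer : ∀ (n : Nat) (l : List Char), l.length ≤ n →
    ∀ (cur : List Char) (cells : List (List Char)),
    (l.foldl bStep (0, cur, cells)).2.2 = cells ++ aOuter l := by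
  intro n
  induction n with
  | zero =>
    intro l hl cur cells
    have : l = [] := List.eq_nil_of_length_eq_zero (Nat.le_zero.mp hl)
    subst this; simp [aOuter]
  | succ n ih =>
    intro l hl cur cells
    match l with
    | [] => simp [aOuter]
    | c :: t =>
      by_cases hb : c = '['
      · subst hb
        rw [List.foldl_cons]
        show (t.foldl bStep (bStep (0, cur, cells) '[')).2.2 = _
        rw [show bStep (0, cur, cells) '[' = (1, [], cells) from by simp [bStep]]
        rw [fold_inner t 1 [] cells (by omega)]
        rw [aOuter.eq_def]
        simp only [reduceIte]
        cases h : aInner t 1 [] with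
        | none => simp
        | some p =>
          obtain ⟨cell, rest'⟩ := p
          have hlen : rest'.length < t.length := aInner_length _ _ _ _ _ h
          simp only []
          simp [ih rest' (by simp at hl; omega) cell (cells ++ [cell])]
      · rw [List.foldl_cons]
        have hst : bStep (0, cur, cells) c = (0, cur, cells) := by
          by_cases hc : c = ']' <;> simp [bStep, hb, hc]
        rw [hst, ih t (by simp at hl; omega) cur cells]
        conv_rhs => rw [aOuter.eq_def]
        simp [hb]

-- ===== VERDICT (by name: the statement is the Claim_ definition above) =====
theorem split_table_row_py_spec : Claim_equal_split_table_row_py := by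
  intro line _
  unfold Spec_split_table_row_py split_table_row_py split_table_row_py_alt
  rw [fold_outer line.toList.length line.toList (le_refl _)]
  simp
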